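-- pv_equiv track=rewrite | github.com/Talgatovich/algorithms-templates | python/sprint1_nonfinals/final2.py | check_score
-- ===== SOURCE A (Python) =====
-- def check_score(train, k):
--     score = 0
--     for i in range(1, 10):
--         cnt = train.count(str(i))
--         if str(i) in train and cnt <= k * 2:
--             score += 1
--         else:
--             continue
--     return score
-- ===== SOURCE B (Python) =====
-- def check_score(train, k):
--     srt = sorted(train)
--     score = 0
--     i = 0
--     n = len(srt)
--     while i < n:
--         j = i + 1
--         while j < n and srt[j] == srt[i]:
--             j += 1
--         if srt[i] in ("1", "2", "3", "4", "5", "6", "7", "8", "9") and j - i <= 2 * k: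
--             score += 1
--         i = j
--     return score
-- ===== Notes on version B (the rewrite author's own statement) =====
-- stated objective: alternative
-- what changed: Sort-then-scan: B sorts the list once and walks it with two pointers over runs of equal elements, scoring a run when its value is a digit string and its length is at most 2k, instead of A's nine full-list count/membership scans.
import Mathlib
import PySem

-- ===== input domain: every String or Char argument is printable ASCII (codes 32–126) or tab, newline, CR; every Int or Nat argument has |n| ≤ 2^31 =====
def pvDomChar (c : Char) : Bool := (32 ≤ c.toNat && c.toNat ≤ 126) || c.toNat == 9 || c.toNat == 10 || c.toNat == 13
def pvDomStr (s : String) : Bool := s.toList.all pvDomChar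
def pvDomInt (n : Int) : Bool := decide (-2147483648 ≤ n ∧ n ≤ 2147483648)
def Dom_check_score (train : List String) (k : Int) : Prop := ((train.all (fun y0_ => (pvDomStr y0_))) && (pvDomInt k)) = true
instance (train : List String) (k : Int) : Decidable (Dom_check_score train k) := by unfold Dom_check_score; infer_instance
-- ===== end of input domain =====

-- B sorts the list once and scans runs of equal elements with two pointers, scoring a
-- digit-string run of length ≤ 2k, instead of A's nine full-list count/membership scans
-- (objective: alternative).


-- ===== PORT A =====
def check_score (train : List String) (k : Int) : Int :=
  (PySem.List.pyRange 1 10).foldl (fun score i =>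
    let cnt : Int := (PySem.List.count train (PySem.Int.toStr i) : Int)
    if PySem.Int.toStr i ∈ train ∧ cnt ≤ k * 2 then score + 1 else score) 0

-- ===== PORT B =====
-- the tuple ("1", …, "9") of Source B
def pvDigits : List String := ["1", "2", "3", "4", "5", "6", "7", "8", "9"]

-- the outer while loop of Source B: the remaining suffix srt[i:] is the argument; the inner
-- while loop advancing j over the run of elements equal to srt[i] is the takeWhile/dropWhile
-- split, with j - i = 1 + run.length.
def pvRunScan (k : Int) : List String → Int → Int
  | [], score => score
  | x :: rest, score =>
      let run := rest.takeWhile (fun y => y == x)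
      let d := rest.dropWhile (fun y => y == x)
      pvRunScan k d
        (if x ∈ pvDigits ∧ ((1 + run.length : Int)) ≤ 2 * k then score + 1 else score)
  termination_by l _ => l.length
  decreasing_by
    simp only [List.length_cons]
    exact Nat.lt_succ_of_le (List.length_dropWhile_le _ _)

def check_score_alt (train : List String) (k : Int) : Int :=
  pvRunScan k (PySem.List.sorted train (fun x => x) false) 0

-- ===== PRECONDITION & SPEC =====
def Spec_check_score (train : List String) (k : Int) (out : Int) : Prop := out = check_score_alt train k
instance (train : List String) (k : Int) (out : Int) : Decidable (Spec_check_score train k out) := by unfold Spec_check_score; infer_instance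

-- ===== CLAIM (what is proved, stated in full; the proofs are below) =====
def Claim_equal_check_score : Prop := ∀ (train : List String) (k : Int), Dom_check_score train k → Spec_check_score train k (check_score train k)

-- ===== LEMMAS AND PROOFS =====

-- A counts the digit strings "1"…"9" that occur in train with count ≤ 2k.
theorem checkA_eq_countP (train : List String) (k : Int) :
    check_score train k =
      ((pvDigits.countP
        (fun s => decide (s ∈ train ∧ (List.count s train : Int) ≤ k * 2)) : Nat) : Int) := by
  show (PySem.List.pyRange 1 10).foldl (fun score i =>
      if PySem.Int.toStr i ∈ train ∧ (PySem.List.count train (PySem.Int.toStr i) : Int) ≤ k * 2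
      then score + 1 else score) 0 = _
  rw [PySem.List.foldl_ite_add_one
    (fun i => PySem.Int.toStr i ∈ train ∧ (PySem.List.count train (PySem.Int.toStr i) : Int) ≤ k * 2)]
  have : pvDigits = (PySem.List.pyRange 1 10).map PySem.Int.toStr := by decide
  rw [this]
  simp [List.countP_map, Function.comp_def, PySem.List.count_eq]

-- counting over a nodup list: split off one element x on which p may differ from q
theorem countP_split {α : Type} [DecidableEq α] (x : α) :
    ∀ (L : List α), L.Nodup → ∀ (p q : α → Bool),
      (∀ e ∈ L, e ≠ x → p e = q e) → q x = false →
      L.countP p = (if x ∈ L ∧ p x = true then 1 else 0) + L.countP q := by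
  intro L
  induction L with
  | nil => intro _ p q _ _; simp
  | cons a L ih =>
    intro hnd p q hag hqx
    rcases List.nodup_cons.mp hnd with ⟨hax, hndL⟩
    by_cases hx : a = x
    · subst hx
      have hLpq : L.countP p = L.countP q := by
        apply List.countP_congr
        intro e he
        rw [hag e (List.mem_cons_of_mem _ he) (fun h => hax (h ▸ he))]
      simp only [List.countP_cons, hLpq, hqx]
      by_cases hpa : p a = true <;> simp [hpa] <;> omega
    · have hrec := ih hndL p q (fun e he hne => hag e (List.mem_cons_of_mem _ he) hne) hqx
      have hpa : p a = q a := hag a List.mem_cons_self hx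
      have hmx : (x ∈ a :: L) ↔ x ∈ L := by
        constructor
        · intro h
          rcases List.mem_cons.mp h with h | h
          · exact absurd h.symm hx
          · exact h
        · exact List.mem_cons_of_mem _
      by_cases hmem : x ∈ L ∧ p x = true
      · simp only [List.countP_cons, hrec, hpa, if_pos hmem,
          if_pos (show x ∈ a :: L ∧ p x = true from ⟨hmx.mpr hmem.1, hmem.2⟩)]
        omega
      · simp only [List.countP_cons, hrec, hpa, if_neg hmem,
          if_neg (show ¬(x ∈ a :: L ∧ p x = true) from fun h => hmem ⟨hmx.mp h.1, h.2⟩)]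
        omega

-- in a ≤-sorted list x :: rest, x does not reappear after the leading run of x's
theorem not_mem_dropWhile_of_sorted (x : String) (rest : List String)
    (hs : (x :: rest).Pairwise (fun a b => a ≤ b)) :
    x ∉ rest.dropWhile (fun y => y == x) := by
  intro hmem
  rcases List.pairwise_cons.mp hs with ⟨hle, hrest⟩
  cases hd : rest.dropWhile (fun y => y == x) with
  | nil => rw [hd] at hmem; exact absurd hmem (List.not_mem_nil)
  | cons h d' =>
    rw [hd] at hmem
    have hh : (h == x) = false := by
      have hne : rest.dropWhile (fun y => y == x) ≠ [] := by rw [hd]; simp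
      have h0 := List.head_dropWhile_not (fun y => y == x) hne
      simp only [hd, List.head_cons] at h0
      exact h0
    have hhx : h ≠ x := by simpa using hh
    have hsub : (h :: d').Sublist rest := hd ▸ List.dropWhile_sublist _
    have hhmem : h ∈ rest := hsub.mem List.mem_cons_self
    have hxh : x ≤ h := hle h hhmem
    rcases List.mem_cons.mp hmem with h1 | h1
    · exact hhx h1.symm
    · have hpw : (h :: d').Pairwise (fun a b => a ≤ b) := hrest.sublist hsub
      have hhle : h ≤ x := (List.pairwise_cons.mp hpw).1 x h1
      exact hhx (le_antisymm hhle hxh)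

-- the run scan over a sorted list counts the distinct digit strings present with count ≤ 2k
theorem pvRunScan_eq (k : Int) :
    ∀ (n : Nat) (l : List String), l.length ≤ n → l.Pairwise (fun a b => a ≤ b) →
      ∀ (score : Int),
      pvRunScan k l score =
        score + ((pvDigits.countP
          (fun s => decide (s ∈ l ∧ (List.count s l : Int) ≤ 2 * k)) : Nat) : Int) := by
  intro n
  induction n with
  | zero =>
    intro l hlen _ score
    have : l = [] := List.length_eq_zero_iff.mp (Nat.le_zero.mp hlen)
    subst this
    simp [pvRunScan]
  | succ n ih =>
    intro l hlen hs score
    cases l with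
    | nil => simp [pvRunScan]
    | cons x rest =>
      rw [pvRunScan]
      set t := rest.takeWhile (fun y => y == x) with ht
      set d := rest.dropWhile (fun y => y == x) with hd
      have hsplit : rest = t ++ d := (List.takeWhile_append_dropWhile).symm
      have htall : ∀ y ∈ t, y = x := by
        intro y hy
        have := List.mem_takeWhile_imp hy
        simpa using this
      have hxd : x ∉ d := not_mem_dropWhile_of_sorted x rest hs
      have hdsub : d.Sublist rest := List.dropWhile_sublist _
      have hdsorted : d.Pairwise (fun a b => a ≤ b) :=
        ((List.pairwise_cons.mp hs).2).sublist hdsub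
      have hdlen : d.length ≤ n := by
        have := hdsub.length_le
        simp only [List.length_cons] at hlen
        omega
      rw [ih d hdlen hdsorted]
      -- count facts
      have hcx : List.count x (x :: rest) = 1 + t.length := by
        have h1 : List.count x t = t.length :=
          List.count_eq_length.mpr (fun b hb => (htall b hb).symm)
        have h2 : List.count x d = 0 := List.count_eq_zero.mpr hxd
        rw [hsplit]
        simp [List.count_cons_self, List.count_append, h1, h2]
        omega
      have hce : ∀ e : String, e ≠ x → List.count e (x :: rest) = List.count e d := by
        intro e hne
        have h1 : List.count e t = 0 :=
          List.count_eq_zero.mpr (fun hmem => hne (htall e hmem))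
        rw [hsplit]
        simp [List.count_cons, List.count_append, h1]
        exact fun h => hne h.symm
      have hme : ∀ e : String, e ≠ x → (e ∈ x :: rest ↔ e ∈ d) := by
        intro e hne
        rw [hsplit]
        simp only [List.mem_cons, List.mem_append]
        constructor
        · rintro (h | h | h)
          · exact absurd h hne
          · exact absurd (htall e h) hne
          · exact h
        · intro h; right; right; exact h
      have hnd : pvDigits.Nodup := by decide
      rw [countP_split x pvDigits hnd
        (fun s => decide (s ∈ x :: rest ∧ (List.count s (x :: rest) : Int) ≤ 2 * k))
        (fun s => decide (s ∈ d ∧ (List.count s d : Int) ≤ 2 * k))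
        (fun e _ hne => by simp only [decide_eq_decide]; rw [hce e hne]; simp [hme e hne])
        (by simp [hxd])]
      have hpx : (decide (x ∈ x :: rest ∧ (List.count x (x :: rest) : Int) ≤ 2 * k) = true)
          ↔ ((1 + t.length : Int) ≤ 2 * k) := by
        simp only [decide_eq_true_eq, List.mem_cons, true_or, true_and, hcx]
        push_cast
        constructor <;> intro h <;> omega
      by_cases hcond : x ∈ pvDigits ∧ ((1 + t.length : Int)) ≤ 2 * k
      · have : (x ∈ pvDigits ∧ decide (x ∈ x :: rest ∧ (List.count x (x :: rest) : Int) ≤ 2 * k) = true) := ⟨hcond.1, hpx.mpr hcond.2⟩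
        rw [if_pos hcond, if_pos this]
        push_cast
        ring
      · have : ¬ (x ∈ pvDigits ∧ decide (x ∈ x :: rest ∧ (List.count x (x :: rest) : Int) ≤ 2 * k) = true) := by
          intro ⟨h1, h2⟩; exact hcond ⟨h1, hpx.mp h2⟩
        rw [if_neg hcond, if_neg this]
        push_cast
        ring

theorem check_score_spec : Claim_equal_check_score := by
  intro train k _
  unfold Spec_check_score check_score_alt
  set srt := PySem.List.sorted train (fun x => x) false with hsrt
  have hperm : srt.Perm train := PySem.List.sorted_perm train (fun x => x) false
  have hpw : srt.Pairwise (fun a b => a ≤ b) := by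
    have := PySem.List.sorted_pairwise train (fun x => x)
    simpa using this
  rw [checkA_eq_countP, pvRunScan_eq k srt.length srt le_rfl hpw 0, Int.zero_add]
  congr 1
  apply List.countP_congr
  intro s _
  simp only [decide_eq_true_eq]
  rw [hperm.mem_iff, hperm.count_eq]
  constructor <;> rintro ⟨h1, h2⟩ <;> exact ⟨h1, by omega⟩
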